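-- pv_equiv track=rewrite | github.com/cpt-r3tr0/hakerrank-mathematics | Number Theory/Ants.py | solve
-- ===== SOURCE A (Python) =====
-- def solve(V, N):
--     C = [1]
--     for i in range(1,N):
--         if V[i]-V[i-1]==1:
--             C[-1] += 1
--         else:
--             C.append(1)
--     if V[0]+1000-V[N-1]==1:
--         C[0] += C.pop()
--     a = N//2
--     b = N-a
--     res = 400000*a*b
--     for c in C:
--         res += 2*(c//2)
--     return (res)
-- ===== SOURCE B (Python) =====
-- def solve(V, N):
--     a = N // 2
--     res = 400000 * a * (N - a)
--     first = -1
--     run = 1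
--     for i in range(1, N):
--         if V[i] - V[i-1] == 1:
--             run += 1
--         else:
--             if first < 0:
--                 first = run
--             else:
--                 res += 2 * (run // 2)
--             run = 1
--     merge = (V[0] + 1000 - V[N-1] == 1)
--     if first < 0:
--         res += 2 * (run // 2)
--     elif merge:
--         res += 2 * ((first + run) // 2)
--     else:
--         res += 2 * (first // 2) + 2 * (run // 2)
--     return res
-- ===== Notes on version B (the rewrite author's own statement) =====
-- stated objective: alternative
-- what changed: B replaces A's materialized run-length list (one loop to build it, a pop/merge fix-up, then a second summing loop) by a single scan that keeps only the first run length, the current run length and a running total, applying the circular merge arithmetically at the end.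
import Mathlib
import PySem

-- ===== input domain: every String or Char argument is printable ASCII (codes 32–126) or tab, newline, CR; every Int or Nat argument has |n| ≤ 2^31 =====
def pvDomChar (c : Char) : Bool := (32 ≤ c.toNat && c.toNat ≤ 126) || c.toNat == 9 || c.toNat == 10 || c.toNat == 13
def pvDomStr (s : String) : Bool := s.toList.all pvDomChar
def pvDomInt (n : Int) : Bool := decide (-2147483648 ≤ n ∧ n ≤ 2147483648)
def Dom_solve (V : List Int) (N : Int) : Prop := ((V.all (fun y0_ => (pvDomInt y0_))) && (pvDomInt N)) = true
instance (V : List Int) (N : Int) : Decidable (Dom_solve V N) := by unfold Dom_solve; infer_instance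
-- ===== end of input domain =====

-- B replaces A's run-length list (built in one loop, summed in a second) by a single scan that
-- keeps only the first run, the current run and an accumulator; objective: alternative decomposition.

-- ===== PORT A =====
-- loop body of A's first for-loop: extend the last run or start a new one
def stepA (V : List Int) (C : List Int) (i : Int) : List Int :=
  if PySem.List.pyGetD V i 0 - PySem.List.pyGetD V (i-1) 0 = 1 then
    C.dropLast ++ [C.getLastD 0 + 1]        -- C[-1] += 1
  else
    C ++ [1]                                 -- C.append(1)

def solve (V : List Int) (N : Int) : Int :=
  let C := (PySem.List.pyRange 1 N 1).foldl (stepA V) [1]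
  let C := if PySem.List.pyGetD V 0 0 + 1000 - PySem.List.pyGetD V (N-1) 0 = 1 then
      match C.dropLast with
      | [] => []                             -- Python raises IndexError here (C[0] on []); excluded by Pre_solve
      | c0 :: rest => (c0 + C.getLastD 0) :: rest   -- C[0] += C.pop()
    else C
  let a := PySem.Int.floordiv N 2
  let b := N - a
  C.foldl (fun r c => r + 2 * PySem.Int.floordiv c 2) (400000 * a * b)

-- ===== PORT B =====
-- loop body of B's single scan; state = (first, run, res)
def stepB (V : List Int) (st : Int × Int × Int) (i : Int) : Int × Int × Int :=
  match st with
  | (first, run, res) =>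
    if PySem.List.pyGetD V i 0 - PySem.List.pyGetD V (i-1) 0 = 1 then
      (first, run + 1, res)
    else if first < 0 then
      (run, 1, res)
    else
      (first, 1, res + 2 * PySem.Int.floordiv run 2)

def solve_alt (V : List Int) (N : Int) : Int :=
  let a := PySem.Int.floordiv N 2
  match (PySem.List.pyRange 1 N 1).foldl (stepB V) (-1, 1, 400000 * a * (N - a)) with
  | (first, run, res) =>
    let merge := PySem.List.pyGetD V 0 0 + 1000 - PySem.List.pyGetD V (N-1) 0 = 1
    if first < 0 then res + 2 * PySem.Int.floordiv run 2
    else if merge then res + 2 * PySem.Int.floordiv (first + run) 2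
    else res + 2 * PySem.Int.floordiv first 2 + 2 * PySem.Int.floordiv run 2

-- ===== PRECONDITION & SPEC =====
-- Pre_ excludes exactly the inputs on which A raises: out-of-range indexing (empty V, N outside
-- [1-len(V), len(V)]) and the single-run-spanning-the-circle case where 'C[0] += C.pop()' empties C.
def Pre_solve (V : List Int) (N : Int) : Prop :=
  V ≠ [] ∧ 1 - (V.length : Int) ≤ N ∧ N ≤ (V.length : Int) ∧
  ¬((∀ i ∈ PySem.List.pyRange 1 N 1,
        PySem.List.pyGetD V i 0 - PySem.List.pyGetD V (i-1) 0 = 1) ∧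
    PySem.List.pyGetD V 0 0 + 1000 - PySem.List.pyGetD V (N-1) 0 = 1)
instance (V : List Int) (N : Int) : Decidable (Pre_solve V N) := by unfold Pre_solve; infer_instance

def pvWitness_solve : List Int × Int := ([1, 5, 6], 3)

def Spec_solve (V : List Int) (N : Int) (out : Int) : Prop := out = solve_alt V N
instance (V : List Int) (N : Int) (out : Int) : Decidable (Spec_solve V N out) := by unfold Spec_solve; infer_instance

-- ===== CLAIM (what is proved, stated in full; the proofs are below) =====
def Claim_equal_solve : Prop := ∀ (V : List Int) (N : Int), Dom_solve V N → Pre_solve V N → Spec_solve V N (solve V N)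
-- ===== LEMMAS AND PROOFS =====

def sum0 (l : List Int) : Int := l.foldl (fun r c => r + 2 * PySem.Int.floordiv c 2) 0

lemma foldl_sum_shift (l : List Int) : ∀ (b c : Int),
    l.foldl (fun r x => r + 2 * PySem.Int.floordiv x 2) (b + c)
      = b + l.foldl (fun r x => r + 2 * PySem.Int.floordiv x 2) c := by
  induction l with
  | nil => intro b c; simp
  | cons x l ih =>
    intro b c
    simp only [List.foldl_cons]
    rw [show b + c + 2 * PySem.Int.floordiv x 2 = b + (c + 2 * PySem.Int.floordiv x 2) by ring,
        ih]

lemma sumf_shift (l : List Int) (b : Int) :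
    l.foldl (fun r c => r + 2 * PySem.Int.floordiv c 2) b = b + sum0 l := by
  have h := foldl_sum_shift l b 0
  rw [add_zero] at h
  rw [h, sum0]

lemma sum0_concat (l : List Int) (x : Int) : sum0 (l ++ [x]) = sum0 l + 2 * PySem.Int.floordiv x 2 := by
  simp only [sum0, List.foldl_append, List.foldl_cons, List.foldl_nil]

-- the loop invariant relating A's run list C to B's state (first, run, res)
def InvP (base : Int) (C : List Int) (st : Int × Int × Int) : Prop :=
  1 ≤ st.2.1 ∧
  ((st.1 = -1 ∧ C = [st.2.1] ∧ st.2.2 = base) ∨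
   (1 ≤ st.1 ∧ ∃ mid, C = st.1 :: mid ++ [st.2.1] ∧ st.2.2 = base + sum0 mid))

lemma fold_inv (V : List Int) (base : Int) :
    ∀ (L : List Int) (C : List Int) (st : Int × Int × Int),
    InvP base C st →
    InvP base (L.foldl (stepA V) C) (L.foldl (stepB V) st) ∧
    ((L.foldl (stepB V) st).1 = -1 →
      st.1 = -1 ∧ ∀ i ∈ L, PySem.List.pyGetD V i 0 - PySem.List.pyGetD V (i-1) 0 = 1) := by
  intro L
  induction L with
  | nil => intro C st h; exact ⟨h, fun hm => ⟨hm, by simp⟩⟩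
  | cons i L ih =>
    intro C st h
    obtain ⟨f, r, a⟩ := st
    obtain ⟨hr, hcase⟩ := h
    replace hr : 1 ≤ r := hr
    simp only [List.foldl_cons]
    by_cases hc : PySem.List.pyGetD V i 0 - PySem.List.pyGetD V (i-1) 0 = 1
    · have hA : stepA V C i = C.dropLast ++ [C.getLastD 0 + 1] := by simp [stepA, hc]
      have hB : stepB V (f, r, a) i = (f, r + 1, a) := by simp [stepB, hc]
      rw [hA, hB]
      have hinv : InvP base (C.dropLast ++ [C.getLastD 0 + 1]) (f, r + 1, a) := by
        refine ⟨by simp only; omega, ?_⟩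
        rcases hcase with ⟨h1, h2, h3⟩ | ⟨h1, mid, h2, h3⟩
        · replace h2 : C = [r] := h2
          left; refine ⟨h1, ?_, h3⟩; subst h2; simp
        · replace h2 : C = f :: mid ++ [r] := h2
          right; refine ⟨h1, mid, ?_, h3⟩
          subst h2
          rw [show f :: mid ++ [r] = (f :: mid) ++ [r] by simp,
              List.dropLast_concat, List.getLastD_concat]
      obtain ⟨H1, H2⟩ := ih _ _ hinv
      refine ⟨H1, fun hm => ?_⟩
      obtain ⟨hf, hall⟩ := H2 hm
      refine ⟨hf, fun j hj => ?_⟩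
      rcases List.mem_cons.mp hj with rfl | hj
      · exact hc
      · exact hall j hj
    · have hA : stepA V C i = C ++ [1] := by simp [stepA, hc]
      rw [hA]
      rcases hcase with ⟨h1, h2, h3⟩ | ⟨h1, mid, h2, h3⟩
      · replace h1 : f = -1 := h1
        replace h2 : C = [r] := h2
        replace h3 : a = base := h3
        have hB : stepB V (f, r, a) i = (r, 1, a) := by
          simp only [stepB, if_neg hc]
          rw [if_pos (by omega)]
        rw [hB]
        have hinv : InvP base (C ++ [1]) (r, 1, a) := by
          refine ⟨le_refl 1, Or.inr ⟨hr, [], ?_, ?_⟩⟩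
          · subst h2; simp
          · rw [h3]; simp [sum0]
        obtain ⟨H1, H2⟩ := ih _ _ hinv
        refine ⟨H1, fun hm => absurd ((H2 hm).1 : r = -1) (by omega)⟩
      · replace h1 : 1 ≤ f := h1
        replace h2 : C = f :: mid ++ [r] := h2
        replace h3 : a = base + sum0 mid := h3
        have hB : stepB V (f, r, a) i = (f, 1, a + 2 * PySem.Int.floordiv r 2) := by
          simp only [stepB, if_neg hc]
          rw [if_neg (by omega)]
        rw [hB]
        have hinv : InvP base (C ++ [1]) (f, 1, a + 2 * PySem.Int.floordiv r 2) := by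
          refine ⟨le_refl 1, Or.inr ⟨h1, mid ++ [r], ?_, ?_⟩⟩
          · subst h2; simp
          · show a + 2 * PySem.Int.floordiv r 2 = base + sum0 (mid ++ [r])
            rw [h3, sum0_concat]; ring
        obtain ⟨H1, H2⟩ := ih _ _ hinv
        refine ⟨H1, fun hm => absurd ((H2 hm).1 : f = -1) (by omega)⟩

-- ===== VERDICT (by name: the statement is the Claim_ definition above) =====
theorem solve_spec : Claim_equal_solve := by
  intro V N _ hpre
  obtain ⟨hne, hlo, hhi, hnot⟩ := hpre
  unfold Spec_solve solve solve_alt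
  rcases hE : (PySem.List.pyRange 1 N 1).foldl (stepB V)
      (-1, 1, 400000 * PySem.Int.floordiv N 2 * (N - PySem.Int.floordiv N 2)) with ⟨f, r, a⟩
  obtain ⟨hinv, hall⟩ := fold_inv V (400000 * PySem.Int.floordiv N 2 * (N - PySem.Int.floordiv N 2))
      (PySem.List.pyRange 1 N 1) [1]
      (-1, 1, 400000 * PySem.Int.floordiv N 2 * (N - PySem.Int.floordiv N 2))
      ⟨le_refl 1, Or.inl ⟨rfl, rfl, rfl⟩⟩
  rw [hE] at hinv hall
  obtain ⟨hr, hcase⟩ := hinv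
  replace hr : 1 ≤ r := hr
  simp only [hE]
  by_cases hmerge : PySem.List.pyGetD V 0 0 + 1000 - PySem.List.pyGetD V (N-1) 0 = 1
  · -- merge case: Pre_ rules out a single run, so C = f :: mid ++ [r]
    rcases hcase with ⟨h1, _, _⟩ | ⟨h1, mid, h2, h3⟩
    · exact absurd ⟨(hall h1).2, hmerge⟩ hnot
    · replace h1 : 1 ≤ f := h1
      replace h2 : (PySem.List.pyRange 1 N 1).foldl (stepA V) [1] = f :: mid ++ [r] := h2
      replace h3 : a = 400000 * PySem.Int.floordiv N 2 * (N - PySem.Int.floordiv N 2) + sum0 mid := h3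
      rw [h2, if_pos hmerge,
          show f :: mid ++ [r] = (f :: mid) ++ [r] by simp,
          List.dropLast_concat, List.getLastD_concat]
      simp only [if_pos hmerge, if_neg (show ¬ f < 0 by omega)]
      rw [List.foldl_cons, sumf_shift, h3]
      ring
  · rcases hcase with ⟨h1, h2, h3⟩ | ⟨h1, mid, h2, h3⟩
    · replace h1 : f = -1 := h1
      replace h2 : (PySem.List.pyRange 1 N 1).foldl (stepA V) [1] = [r] := h2
      replace h3 : a = 400000 * PySem.Int.floordiv N 2 * (N - PySem.Int.floordiv N 2) := h3
      rw [h2, if_neg hmerge]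
      simp only [if_pos (show f < 0 by omega)]
      rw [List.foldl_cons, List.foldl_nil, h3]
    · replace h1 : 1 ≤ f := h1
      replace h2 : (PySem.List.pyRange 1 N 1).foldl (stepA V) [1] = f :: mid ++ [r] := h2
      replace h3 : a = 400000 * PySem.Int.floordiv N 2 * (N - PySem.Int.floordiv N 2) + sum0 mid := h3
      rw [h2, if_neg hmerge]
      simp only [if_neg hmerge, if_neg (show ¬ f < 0 by omega)]
      rw [show f :: mid ++ [r] = f :: (mid ++ [r]) by simp,
          List.foldl_cons, sumf_shift, sum0_concat, h3]
      ring
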